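-- pv_equiv track=rewrite | github.com/irmankim711/prototype | backend/app/middleware/security.py | is_safe_url
-- ===== SOURCE A (Python) =====
-- def is_safe_url(url: str) -> bool:
--     """Enhanced URL safety check (no open redirects)."""
--     if not url:
--         return False
--
--     # Check for dangerous protocols
--     dangerous_protocols = ['javascript:', 'data:', 'vbscript:', 'file:', 'about:', 'chrome:', 'moz-extension:']
--     url_lower = url.lower()
--
--     for protocol in dangerous_protocols:
--         if url_lower.startswith(protocol):
--             return False
--
--     return True
-- ===== SOURCE B (Python) =====
-- _DANGEROUS_SCHEMES = frozenset({'javascript', 'data', 'vbscript', 'file',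
--                                 'about', 'chrome', 'moz-extension'})
--
--
-- def is_safe_url(url: str) -> bool:
--     """Enhanced URL safety check (no open redirects)."""
--     if not url:
--         return False
--     scheme, sep, _ = url.lower().partition(':')
--     return not (sep and scheme in _DANGEROUS_SCHEMES)
-- ===== Notes on version B (the rewrite author's own statement) =====
-- stated objective: idiomatic
-- what changed: Replaced the loop of per-protocol startswith tests with a single str.partition at the first colon and one frozenset membership test on the bare scheme name.
import Mathlib
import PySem

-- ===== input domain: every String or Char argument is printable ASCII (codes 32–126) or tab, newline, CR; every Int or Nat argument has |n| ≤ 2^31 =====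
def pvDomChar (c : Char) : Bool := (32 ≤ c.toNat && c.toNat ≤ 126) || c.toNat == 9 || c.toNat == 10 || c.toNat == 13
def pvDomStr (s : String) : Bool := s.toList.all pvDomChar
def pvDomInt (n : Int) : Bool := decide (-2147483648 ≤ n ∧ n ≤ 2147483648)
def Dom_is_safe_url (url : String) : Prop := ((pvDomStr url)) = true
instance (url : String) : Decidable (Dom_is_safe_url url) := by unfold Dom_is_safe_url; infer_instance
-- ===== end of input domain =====

-- B replaces A's per-protocol startswith loop by one partition-at-first-colon plus a set membership test on the bare scheme (idiomatic; same result).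

-- ===== PORT A =====
def is_safe_url (url : String) : Bool :=
  if url = "" then false
  else
    let dangerous_protocols : List String :=
      ["javascript:", "data:", "vbscript:", "file:", "about:", "chrome:", "moz-extension:"]
    let url_lower := PySem.Str.lower url
    -- for protocol in dangerous_protocols: if url_lower.startswith(protocol): return False
    if dangerous_protocols.any (fun protocol => PySem.Str.startswith url_lower protocol) then false
    else true

-- ===== PORT B =====
def dangerousSchemes : List (List Char) :=
  ["javascript".toList, "data".toList, "vbscript".toList, "file".toList,
   "about".toList, "chrome".toList, "moz-extension".toList]

def is_safe_url_alt (url : String) : Bool :=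
  if url = "" then false
  else
    -- scheme, sep, _ = url.lower().partition(':'); return not (sep and scheme in _DANGEROUS_SCHEMES)
    let cs := PySem.Chars.lower url.toList
    let scheme := cs.takeWhile (· ≠ ':')
    let sep := cs.contains ':'
    !(sep && dangerousSchemes.contains scheme)

-- ===== PRECONDITION & SPEC =====
def Spec_is_safe_url (url : String) (out : Bool) : Prop := out = is_safe_url_alt url
instance (url : String) (out : Bool) : Decidable (Spec_is_safe_url url out) := by unfold Spec_is_safe_url; infer_instance

-- ===== CLAIM (what is proved, stated in full; the proofs are below) =====
def Claim_equal_is_safe_url : Prop := ∀ (url : String), Dom_is_safe_url url → Spec_is_safe_url url (is_safe_url url)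

-- ===== LEMMAS AND PROOFS =====

-- p ++ ":" is a prefix of cs iff cs contains a colon and the part of cs before its first colon is p
theorem prefix_colon_iff (p : List Char) (hp : (':' : Char) ∉ p) (cs : List Char) :
    (p ++ [':']) <+: cs ↔ ((':' : Char) ∈ cs ∧ cs.takeWhile (· ≠ ':') = p) := by
  induction p generalizing cs with
  | nil =>
    cases cs with
    | nil => simp
    | cons c cs' =>
      by_cases hc : c = ':'
      · subst hc; simp [List.takeWhile]
      · simp [List.cons_prefix_cons, List.takeWhile, hc, Ne.symm hc]
  | cons a p' ih =>
    have ha : a ≠ ':' := fun h => hp (h ▸ List.mem_cons_self ..)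
    have hp' : (':' : Char) ∉ p' := fun h => hp (List.mem_cons_of_mem _ h)
    cases cs with
    | nil => simp
    | cons c cs' =>
      by_cases hc : c = ':'
      · subst hc
        rw [List.cons_append, List.cons_prefix_cons]
        simp [List.takeWhile, ha]
      · rw [List.cons_append, List.cons_prefix_cons, ih hp' cs']
        rw [List.takeWhile_cons, if_pos (by simp [hc])]
        simp only [List.mem_cons, List.cons.injEq]
        constructor
        · rintro ⟨rfl, h1, h2⟩; exact ⟨Or.inr h1, rfl, h2⟩
        · rintro ⟨h1, rfl, h2⟩
          exact ⟨rfl, h1.resolve_left (fun h => hc h.symm), h2⟩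

-- boolean form of the same fact, stated on PySem.Chars.startswith
theorem startswith_colon (p : List Char) (hp : (':' : Char) ∉ p) (cs : List Char) :
    PySem.Chars.startswith cs (p ++ [':']) =
      (cs.contains ':' && (cs.takeWhile (· ≠ ':') == p)) := by
  rw [Bool.eq_iff_iff, PySem.Chars.startswith_iff, prefix_colon_iff p hp cs]
  simp

-- ===== VERDICT (by name: the statement is the Claim_ definition above) =====
set_option maxRecDepth 4000 in
theorem is_safe_url_spec : Claim_equal_is_safe_url := by
  intro url _
  unfold Spec_is_safe_url is_safe_url is_safe_url_alt
  by_cases h : url = ""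
  · simp [h]
  · simp only [h, if_false, List.any_cons, List.any_nil,
      PySem.Str.startswith_eq, PySem.Str.toList_lower]
    rw [show ("javascript:".toList) = "javascript".toList ++ [':'] from rfl,
        show ("data:".toList) = "data".toList ++ [':'] from rfl,
        show ("vbscript:".toList) = "vbscript".toList ++ [':'] from rfl,
        show ("file:".toList) = "file".toList ++ [':'] from rfl,
        show ("about:".toList) = "about".toList ++ [':'] from rfl,
        show ("chrome:".toList) = "chrome".toList ++ [':'] from rfl,
        show ("moz-extension:".toList) = "moz-extension".toList ++ [':'] from rfl]
    rw [startswith_colon _ (by decide), startswith_colon _ (by decide),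
        startswith_colon _ (by decide), startswith_colon _ (by decide),
        startswith_colon _ (by decide), startswith_colon _ (by decide),
        startswith_colon _ (by decide)]
    set cs := PySem.Chars.lower url.toList with hcs
    set t := cs.takeWhile (· ≠ ':') with ht
    simp only [dangerousSchemes, List.contains_cons, List.contains_nil, Bool.or_false]
    set c := cs.contains ':' with hc
    set e1 := (t == "javascript".toList)
    set e2 := (t == "data".toList)
    set e3 := (t == "vbscript".toList)
    set e4 := (t == "file".toList)
    set e5 := (t == "about".toList)
    set e6 := (t == "chrome".toList)
    set e7 := (t == "moz-extension".toList)
    cases c <;> cases e1 <;> cases e2 <;> cases e3 <;> cases e4 <;>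
      cases e5 <;> cases e6 <;> cases e7 <;> rfl
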